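-- pv_equiv track=rewrite | github.com/Seung-zedd/Problem-Solving | 프로그래머스/0/120891. 369게임/369게임.py | solution
-- ===== SOURCE A (Python) =====
-- def solution(order):
--     order_ls = [x for x in str(order)]
--     dict = {} # {num: clap}
--
--     for s in order_ls:
--         if s == '3' or s == '6' or s == '9':
--             dict[s] = dict.get(s, 0) + 1
--         else:
--             dict[s] = 0
--     return sum(dict.values())
-- ===== SOURCE B (Python) =====
-- def solution(order):
--     n = abs(order)
--     count = 0
--     while n > 0:
--         if n % 10 in (3, 6, 9):
--             count += 1
--         n //= 10
--     return count
-- ===== Notes on version B (the rewrite author's own statement) =====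
-- stated objective: alternative
-- what changed: Replaced A's string conversion plus per-character dict accumulator with pure integer arithmetic: extract digits of abs(order) by repeated divmod 10 and count those equal to 3, 6 or 9 -- no string, no dict.
import Mathlib
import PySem

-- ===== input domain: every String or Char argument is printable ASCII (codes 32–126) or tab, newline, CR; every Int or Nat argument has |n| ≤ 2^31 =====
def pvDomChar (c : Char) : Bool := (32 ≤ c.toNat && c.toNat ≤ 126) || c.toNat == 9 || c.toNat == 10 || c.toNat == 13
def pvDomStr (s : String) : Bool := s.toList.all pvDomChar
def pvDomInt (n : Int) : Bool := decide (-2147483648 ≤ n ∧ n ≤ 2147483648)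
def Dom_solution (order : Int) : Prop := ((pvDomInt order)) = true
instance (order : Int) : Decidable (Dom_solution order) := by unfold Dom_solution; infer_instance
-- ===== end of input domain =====

-- B replaces A's string/dict digit tally with pure integer arithmetic: repeated divmod-10 on abs(order).


-- ===== PORT A =====
-- one loop step of A: if s in '3','6','9' then dict[s] = dict.get(s,0)+1 else dict[s] = 0
def solutionStep (d : PySem.Dict Char Int) (s : Char) : PySem.Dict Char Int :=
  if s == '3' || s == '6' || s == '9' then d.insert s (d.getD s 0 + 1) else d.insert s 0

def solution (order : Int) : Int :=
  let order_ls : List Char := (PySem.Int.toChars order).map (fun x => x)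
  let d := order_ls.foldl solutionStep PySem.Dict.empty
  d.values.sum

-- ===== PORT B =====
-- the while loop of Source B: n, count are the loop state; n = abs(order) is a Nat (always ≥ 0 in B)
def altLoop (n : Nat) (count : Int) : Int :=
  if n = 0 then count
  else altLoop (n / 10) (if n % 10 = 3 ∨ n % 10 = 6 ∨ n % 10 = 9 then count + 1 else count)
termination_by n
decreasing_by exact Nat.div_lt_self (by omega) (by omega)

def solution_alt (order : Int) : Int := altLoop order.natAbs 0

-- ===== PRECONDITION & SPEC =====
def Spec_solution (order : Int) (out : Int) : Prop := out = solution_alt order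
instance (order : Int) (out : Int) : Decidable (Spec_solution order out) := by unfold Spec_solution; infer_instance

-- ===== CLAIM =====
def Claim_equal_solution : Prop := ∀ (order : Int), Dom_solution order → Spec_solution order (solution order)

-- ===== LEMMAS AND PROOFS =====

-- entries whose key never matches are left unchanged by the overwrite map
theorem map_noKey {v : Int} (l : List (Char × Int)) (k : Char)
    (h : ∀ p ∈ l, p.1 ≠ k) :
    l.map (fun p => if p.1 == k then (k, v) else p) = l := by
  induction l with
  | nil => rfl
  | cons a t ih =>
    have ha : (a.1 == k) = false := by simp [h a (by simp)]
    simp only [List.map_cons, ha, Bool.false_eq_true, if_false]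
    rw [ih (fun p hp => h p (by simp [hp]))]

-- replacing the (unique) entry at key k changes the values-sum by v minus the old value
theorem sum_values_insert_aux (k : Char) (v : Int) : ∀ (l : List (Char × Int)),
    (l.map Prod.fst).Nodup → (∃ p ∈ l, p.1 = k) →
    ((l.map (fun p => if p.1 == k then (k, v) else p)).map Prod.snd).sum
      = (l.map Prod.snd).sum + v - ((l.find? (fun p => p.1 == k)).map Prod.snd).getD 0 := by
  intro l
  induction l with
  | nil => rintro _ ⟨p, hp, _⟩; simp at hp
  | cons a t ih =>
    intro hnd hex
    rw [List.map_cons] at hnd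
    have hnd' := List.nodup_cons.mp hnd
    by_cases hak : a.1 = k
    · have hb : (a.1 == k) = true := by simp [hak]
      simp only [List.map_cons, hb, if_true, List.sum_cons]
      rw [List.find?_cons_of_pos (p := fun p : Char × Int => p.1 == k) hb]
      have hnone : ∀ p ∈ t, p.1 ≠ k := by
        intro p hp hpk
        exact hnd'.1 (hak ▸ hpk ▸ List.mem_map.mpr ⟨p, hp, rfl⟩)
      rw [map_noKey t k hnone]
      simp only [Option.map_some, Option.getD_some]
      omega
    · have hb : (a.1 == k) = false := by simp [hak]
      obtain ⟨p, hp, hpk⟩ := hex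
      have hpt : p ∈ t := by
        rcases List.mem_cons.mp hp with h | h
        · exact absurd (h ▸ hpk) hak
        · exact h
      simp only [List.map_cons, hb, Bool.false_eq_true, if_false,
        List.sum_cons]
      rw [List.find?_cons_of_neg (p := fun p : Char × Int => p.1 == k) (by simp [hb])]
      rw [ih hnd'.2 ⟨p, hpt, hpk⟩]
      omega

theorem sum_values_insert (d : PySem.Dict Char Int) (k : Char) (v : Int)
    (hnd : d.keys.Nodup) :
    ((d.insert k v).values).sum = d.values.sum + v - d.getD k 0 := by
  by_cases hc : d.contains k = true
  · obtain ⟨p, hp, hpk⟩ := List.any_eq_true.mp hc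
    simp only [PySem.Dict.insert, hc, if_true, PySem.Dict.values, PySem.Dict.getD,
      PySem.Dict.get?]
    exact sum_values_insert_aux k v d.items (by simpa [PySem.Dict.keys] using hnd)
      ⟨p, hp, by simpa using hpk⟩
  · simp only [PySem.Dict.insert, hc, Bool.false_eq_true, if_false, PySem.Dict.values]
    rw [PySem.Dict.getD_of_not_contains d (k := k) 0 (by simpa using hc)]
    simp

-- "good" dict: every entry at a key other than '3','6','9' holds 0
def GoodDict (d : PySem.Dict Char Int) : Prop :=
  ∀ p ∈ d.items, p.1 ≠ '3' → p.1 ≠ '6' → p.1 ≠ '9' → p.2 = 0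

theorem getD_zero_of_good (d : PySem.Dict Char Int) (k : Char) (hg : GoodDict d)
    (hk3 : k ≠ '3') (hk6 : k ≠ '6') (hk9 : k ≠ '9') : d.getD k 0 = 0 := by
  simp only [PySem.Dict.getD, PySem.Dict.get?]
  cases hf : d.items.find? (fun p => p.1 == k) with
  | none => rfl
  | some p =>
    have hmem := List.mem_of_find?_eq_some hf
    have hpk : p.1 = k := by
      have := List.find?_some hf
      simpa using this
    have := hg p hmem (hpk ▸ hk3) (hpk ▸ hk6) (hpk ▸ hk9)
    simp [this]

-- loop invariant: processing cs from a good dict adds exactly the number of 3/6/9 chars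
theorem loop_invariant (cs : List Char) : ∀ (d : PySem.Dict Char Int),
    d.keys.Nodup → GoodDict d →
    (cs.foldl solutionStep d).values.sum
      = d.values.sum + (cs.countP (fun c => c == '3' || c == '6' || c == '9') : Int) := by
  induction cs with
  | nil => intro d _ _; simp
  | cons c t ih =>
    intro d hnd hg
    simp only [List.foldl_cons, List.countP_cons]
    have hnd' : (solutionStep d c).keys.Nodup := by
      unfold solutionStep
      split <;> exact PySem.Dict.nodup_keys_insert d _ _ hnd
    have hg' : GoodDict (solutionStep d c) := by
      unfold solutionStep
      split
      next h369 =>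
        intro p hp h3 h6 h9
        rcases (PySem.Dict.mem_items_insert _ _ _ _).mp hp with hpe | ⟨hpd, _⟩
        · exfalso
          subst hpe
          simp only [beq_iff_eq, Bool.or_eq_true] at h369
          rcases h369 with (h | h) | h
          · exact h3 h
          · exact h6 h
          · exact h9 h
        · exact hg p hpd h3 h6 h9
      next =>
        intro p hp h3 h6 h9
        rcases (PySem.Dict.mem_items_insert _ _ _ _).mp hp with hpe | ⟨hpd, _⟩
        · subst hpe; rfl
        · exact hg p hpd h3 h6 h9
    rw [ih (solutionStep d c) hnd' hg']
    unfold solutionStep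
    by_cases h369 : (c == '3' || c == '6' || c == '9') = true
    · rw [if_pos h369, sum_values_insert d c _ hnd]
      simp [h369]; ring
    · rw [if_neg h369, sum_values_insert d c 0 hnd]
      simp only [beq_iff_eq, Bool.or_eq_true, not_or] at h369
      obtain ⟨⟨h3, h6⟩, h9⟩ := h369
      rw [getD_zero_of_good d c hg h3 h6 h9]
      have : (c == '3' || c == '6' || c == '9') = false := by simp [h3, h6, h9]
      simp [this]

-- the accumulator of B's loop shifts out
theorem altLoop_shift (n : Nat) : ∀ c : Int, altLoop n c = c + altLoop n 0 := by
  induction n using Nat.strong_induction_on with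
  | _ n ih =>
    intro c
    by_cases h : n = 0
    · subst h; simp [altLoop]
    · have hlt : n / 10 < n := Nat.div_lt_self (by omega) (by omega)
      conv_lhs => rw [altLoop]
      conv_rhs => rw [altLoop]
      rw [if_neg h, if_neg h]
      split
      · rw [ih _ hlt, ih (n / 10) hlt (0 + 1)]; ring
      · rw [ih _ hlt]

-- the digit emitted for n % 10 satisfies the 3/6/9 test iff the numeric digit is 3, 6 or 9
theorem digitChar_369 (n : Nat) :
    (((n % 10).digitChar == '3' || (n % 10).digitChar == '6' || (n % 10).digitChar == '9') = true)
      ↔ (n % 10 = 3 ∨ n % 10 = 6 ∨ n % 10 = 9) := by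
  have h : n % 10 < 10 := Nat.mod_lt _ (by omega)
  interval_cases h10 : n % 10 <;> simp_all <;> decide

-- countP of the digit string produced by toDigitsCore equals B's loop (fuel form)
theorem countP_toDigitsCore : ∀ (fuel n : Nat) (ds : List Char), n < fuel →
    ((Nat.toDigitsCore 10 fuel n ds).countP
        (fun c => c == '3' || c == '6' || c == '9') : Int)
      = altLoop n 0 + (ds.countP (fun c => c == '3' || c == '6' || c == '9') : Int) := by
  intro fuel
  induction fuel with
  | zero => intro n ds h; omega
  | succ f ih =>
    intro n ds h
    by_cases hn : n = 0
    · subst hn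
      simp [Nat.toDigitsCore, altLoop, Nat.digitChar]
    · rw [Nat.toDigitsCore]
      have hrhs : altLoop n 0
          = (if n % 10 = 3 ∨ n % 10 = 6 ∨ n % 10 = 9 then (1 : Int) else 0) + altLoop (n / 10) 0 := by
        rw [altLoop, if_neg hn, altLoop_shift]
        split <;> ring
      have hcnt : (((n % 10).digitChar :: ds).countP (fun c => c == '3' || c == '6' || c == '9') : Int)
          = (if n % 10 = 3 ∨ n % 10 = 6 ∨ n % 10 = 9 then (1 : Int) else 0)
            + (ds.countP (fun c => c == '3' || c == '6' || c == '9') : Int) := by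
        rw [List.countP_cons]
        by_cases h369 : n % 10 = 3 ∨ n % 10 = 6 ∨ n % 10 = 9
        · have := (digitChar_369 n).mpr h369
          simp [this, h369]; ring
        · have hfalse : (((n % 10).digitChar == '3' || (n % 10).digitChar == '6' || (n % 10).digitChar == '9')) = false := by
            rw [Bool.eq_false_iff]
            intro hc
            exact h369 ((digitChar_369 n).mp hc)
          simp [hfalse, h369]
      by_cases hq : n / 10 = 0
      · simp only [hq, if_true]
        have h0 : altLoop 0 0 = 0 := by rw [altLoop]; simp
        rw [hrhs, hq, h0, hcnt]
        ring
      · simp only [hq, if_false]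
        have hlt : n / 10 < f := by
          have := Nat.div_lt_self (n := n) (by omega) (by omega : 1 < 10)
          omega
        rw [ih (n / 10) _ hlt, hrhs, hcnt]
        ring

theorem countP_toDigits (n : Nat) :
    ((Nat.toDigits 10 n).countP (fun c => c == '3' || c == '6' || c == '9') : Int)
      = altLoop n 0 := by
  have := countP_toDigitsCore (n + 1) n [] (by omega)
  simpa [Nat.toDigits] using this

-- ===== VERDICT =====
theorem solution_spec : Claim_equal_solution := by
  intro order _
  unfold Spec_solution solution solution_alt
  simp only [List.map_id']
  rw [loop_invariant (PySem.Int.toChars order) PySem.Dict.empty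
      (by simp) (by intro p hp; simp [PySem.Dict.empty] at hp)]
  unfold PySem.Int.toChars
  by_cases hneg : order < 0
  · rw [if_pos hneg]
    rw [List.countP_cons]
    simp only [PySem.Dict.empty, PySem.Dict.values, List.map_nil, List.sum_nil, zero_add]
    have : (('-' == '3' || '-' == '6' || '-' == '9')) = false := by decide
    rw [this]
    simpa using countP_toDigits order.natAbs
  · rw [if_neg hneg]
    simp only [PySem.Dict.empty, PySem.Dict.values, List.map_nil, List.sum_nil, zero_add]
    have htn : order.toNat = order.natAbs := by omega
    rw [htn]
    exact countP_toDigits order.natAbs
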